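-- pv_equiv track=rewrite | github.com/Flecart/chess-software-engineering | code/bot/display_board.py | _get_not_visible_squares
-- ===== SOURCE A (Python) =====
-- def _get_not_visible_squares(fen):
--     fen = fen.split(' ')[0]
--     col = 0
--     row = 7
--     position = []
--     for i in range(len(fen)):
--         if fen[i] == '/':
--             row-=1
--             col = 0
--         elif fen[i].isdigit():
--             col+=int(fen[i])
--         else:
--             col+=1
--             if fen[i] == 'X':
--                 position.append((row,col))
--
--     return position
-- ===== SOURCE B (Python) =====
-- def _get_not_visible_squares(fen):
--     # Stage 1: expand digit run-lengths into filler squares, so every board cell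
--     # occupies exactly one character of the expanded rank.
--     field = fen.split(' ')[0]
--     expanded = ''.join('.' * int(c) if c.isdigit() else c for c in field)
--     # Stage 2: coordinates are read off positionally by enumerate; no running
--     # column counter is needed.
--     return [(7 - r, c + 1)
--             for r, rank in enumerate(expanded.split('/'))
--             for c, ch in enumerate(rank)
--             if ch == 'X']
-- ===== Notes on version B (the rewrite author's own statement) =====
-- stated objective: alternative
-- what changed: A's single imperative scan with a running column counter is replaced by a staged pipeline: expand every digit run-length into that many filler placeholder characters so each cell is one character, split the expanded board into ranks, and read coordinates off positionally with enumerate (no column accumulator at all).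
import Mathlib
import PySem

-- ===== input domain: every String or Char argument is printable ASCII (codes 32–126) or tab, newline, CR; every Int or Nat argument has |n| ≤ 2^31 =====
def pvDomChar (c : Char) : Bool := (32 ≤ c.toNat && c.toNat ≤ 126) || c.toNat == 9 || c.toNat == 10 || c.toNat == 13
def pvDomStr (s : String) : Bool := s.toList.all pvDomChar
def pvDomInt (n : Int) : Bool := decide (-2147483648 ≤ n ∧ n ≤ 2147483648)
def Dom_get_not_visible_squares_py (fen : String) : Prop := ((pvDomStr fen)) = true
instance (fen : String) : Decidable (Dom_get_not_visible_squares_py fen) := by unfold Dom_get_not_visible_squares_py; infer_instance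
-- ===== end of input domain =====

-- B replaces A's single running-counter scan with a staged pipeline: expand digit run-lengths
-- into that many filler squares (one character per board cell), split into ranks, and read the
-- coordinates off positionally with enumerate; same return value, no column accumulator.

-- ===== PORT A =====
-- one step of A's loop body; state (col, row, position); int(c) of a digit char is c.toNat - 48 (exact on ASCII digits)
def pvStepA (st : Int × Int × List (Int × Int)) (c : Char) : Int × Int × List (Int × Int) :=
  let (col, row, pos) := st
  if c = '/' then (0, row - 1, pos)
  else if PySem.Chars.isdigit c then (col + ((c.toNat : Int) - 48), row, pos)
  else (col + 1, row, if c = 'X' then pos ++ [(row, col + 1)] else pos)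

def get_not_visible_squares_py (fen : String) : List (Int × Int) :=
  -- fen.split(' ')[0]: sep " " is nonempty so split? is some; the result list is never empty, so [0] is headD
  let field := ((PySem.Str.split? fen " ").getD []).headD ""
  -- for i in range(len(fen)): sequential indexing = the fold over the characters
  (field.toList.foldl pvStepA (0, 7, [])).2.2

-- ===== PORT B =====
-- '.' * int(c) if c.isdigit() else c — one generator element; int(c) of an ASCII digit is c.toNat - 48
def pvExpand1 (c : Char) : List Char :=
  if PySem.Chars.isdigit c then List.replicate (c.toNat - 48) '.' else [c]

def get_not_visible_squares_py_alt (fen : String) : List (Int × Int) :=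
  let field := ((PySem.Str.split? fen " ").getD []).headD ""
  -- ''.join(generator): per-character expansion, i.e. flatMap over the code points
  let expanded := field.toList.flatMap pvExpand1
  -- expanded.split('/'): sep is one char, on the code-point list this is Chars.splitOn
  let ranks := PySem.Chars.splitOn expanded ['/']
  -- the nested comprehension: flatMap over enumerate(ranks), filterMap over enumerate(rank)
  (PySem.List.enumerate ranks).flatMap (fun rp =>
    (PySem.List.enumerate rp.2).filterMap (fun cp =>
      if cp.2 = 'X' then some ((7 - rp.1 : Int), (cp.1 + 1 : Int)) else none))

-- ===== PRECONDITION & SPEC =====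
def Spec_get_not_visible_squares_py (fen : String) (out : List (Int × Int)) : Prop := out = get_not_visible_squares_py_alt fen
instance (fen : String) (out : List (Int × Int)) : Decidable (Spec_get_not_visible_squares_py fen out) := by unfold Spec_get_not_visible_squares_py; infer_instance

-- ===== CLAIM =====
def Claim_equal_get_not_visible_squares_py : Prop := ∀ (fen : String), Dom_get_not_visible_squares_py fen → Spec_get_not_visible_squares_py fen (get_not_visible_squares_py fen)

-- ===== LEMMAS AND PROOFS =====

-- structural single-char split on '/', and its bridge to PySem.Chars.splitOn
def pvConsH (x : List Char) : List (List Char) → List (List Char)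
  | [] => [x]
  | h :: r => (x ++ h) :: r

def pvSC : List Char → List (List Char)
  | [] => [[]]
  | c :: t => if c = '/' then [] :: pvSC t else pvConsH [c] (pvSC t)

theorem pvConsH_ne_nil (x : List Char) (m : List (List Char)) : pvConsH x m ≠ [] := by
  cases m <;> simp [pvConsH]

theorem pvSC_ne_nil (l : List Char) : pvSC l ≠ [] := by
  cases l with
  | nil => simp [pvSC]
  | cons c t =>
    simp only [pvSC]
    split
    · simp
    · exact pvConsH_ne_nil _ _

theorem pvConsH_nil (m : List (List Char)) (h : m ≠ []) : pvConsH [] m = m := by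
  cases m with
  | nil => exact absurd rfl h
  | cons a r => simp [pvConsH]

theorem pvConsH_append (x : List Char) (c : Char) (m : List (List Char)) :
    pvConsH (x ++ [c]) m = pvConsH x (pvConsH [c] m) := by
  cases m <;> simp [pvConsH]

theorem pv_go_eq (fuel : Nat) : ∀ (l cur : List Char) (acc : List (List Char)),
    l.length < fuel →
    PySem.Chars.splitOn.go ['/'] fuel l cur acc = acc.reverse ++ pvConsH cur.reverse (pvSC l) := by
  induction fuel with
  | zero => intro l cur acc h; omega
  | succ fuel ih =>
    intro l cur acc h
    cases l with
    | nil => simp [PySem.Chars.splitOn.go, pvSC, pvConsH]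
    | cons c rest =>
      by_cases hc : c = '/'
      · subst hc
        have hpre : List.isPrefixOf ['/'] ('/' :: rest) = true := by
          simp [List.isPrefixOf]
        rw [PySem.Chars.splitOn.go]
        simp only [hpre, if_pos, List.length_singleton, List.drop_succ_cons, List.drop_zero]
        rw [ih rest [] (cur.reverse :: acc) (by simpa using Nat.lt_of_succ_lt_succ h)]
        simp only [List.reverse_nil]
        rw [pvConsH_nil _ (pvSC_ne_nil rest)]
        simp [pvSC, pvConsH]
      · have hpre : List.isPrefixOf ['/'] (c :: rest) = false := by
          simp [List.isPrefixOf]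
          exact fun hne => absurd hne.symm hc
        rw [PySem.Chars.splitOn.go]
        simp only [hpre, Bool.false_eq_true, if_false]
        rw [ih rest (c :: cur) acc (by simpa using Nat.lt_of_succ_lt_succ h)]
        simp only [List.reverse_cons, pvConsH_append]
        simp [pvSC, hc]

theorem pv_splitOn_slash (l : List Char) : PySem.Chars.splitOn l ['/'] = pvSC l := by
  unfold PySem.Chars.splitOn
  rw [pv_go_eq (l.length + 1) l [] [] (Nat.lt_succ_self _)]
  simp [pvConsH_nil _ (pvSC_ne_nil l)]

-- the full expansion
def pvExpandL (l : List Char) : List Char := l.flatMap pvExpand1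

-- pvSC of a slash-free block prepended
theorem pvSC_append_no_slash (xs : List Char) (rest : List Char) (hx : '/' ∉ xs) :
    pvSC (xs ++ rest) = pvConsH xs (pvSC rest) := by
  induction xs with
  | nil => exact (pvConsH_nil _ (pvSC_ne_nil rest)).symm
  | cons c t ih =>
    have hc : c ≠ '/' := fun h => hx (h ▸ List.mem_cons_self)
    have ht : '/' ∉ t := fun h => hx (List.mem_cons_of_mem _ h)
    simp only [List.cons_append, pvSC, if_neg hc, ih ht]
    cases hsc : pvSC rest with
    | nil => exact absurd hsc (pvSC_ne_nil rest)
    | cons a r => simp [pvConsH]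

theorem pvExpandL_pvConsH (x : List Char) (m : List (List Char)) :
    (pvConsH x m).map pvExpandL = pvConsH (pvExpandL x) (m.map pvExpandL) := by
  cases m <;> simp [pvConsH, pvExpandL]

theorem pvExpand1_no_slash (c : Char) (hc : c ≠ '/') : '/' ∉ pvExpand1 c := by
  unfold pvExpand1
  split
  · intro h
    have := List.eq_of_mem_replicate h
    exact absurd this (by decide)
  · simp [hc.symm]

-- pvSC commutes with the digit expansion ('/' is not a digit, so rank boundaries survive)
theorem pvSC_expand (l : List Char) : pvSC (pvExpandL l) = (pvSC l).map pvExpandL := by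
  induction l with
  | nil => simp [pvExpandL, pvSC]
  | cons c t ih =>
    by_cases hc : c = '/'
    · subst hc
      have h1 : pvExpand1 '/' = ['/'] := by decide
      simp [pvExpandL, pvSC, h1, List.flatMap_cons] at *
      simpa [pvExpandL] using ih
    · have : pvExpandL (c :: t) = pvExpand1 c ++ pvExpandL t := by
        simp [pvExpandL, List.flatMap_cons]
      rw [this, pvSC_append_no_slash _ _ (pvExpand1_no_slash c hc), ih]
      simp only [pvSC, if_neg hc, pvExpandL_pvConsH]
      have : pvExpandL [c] = pvExpand1 c := by simp [pvExpandL]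
      rw [this]

-- B's per-rank step as A performs it (row fixed inside a rank)
def pvScanRank (row : Int) (st : Int × List (Int × Int)) (c : Char) : Int × List (Int × Int) :=
  let (col, pos) := st
  if PySem.Chars.isdigit c then (col + ((c.toNat : Int) - 48), pos)
  else (col + 1, if c = 'X' then pos ++ [(row, col + 1)] else pos)

-- A's step outside the '/' case is the rank step (row unchanged)
theorem pvStepA_ne (col row : Int) (pos : List (Int × Int)) (c : Char) (hc : c ≠ '/') :
    pvStepA (col, row, pos) c
      = ((pvScanRank row (col, pos) c).1, row, (pvScanRank row (col, pos) c).2) := by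
  simp only [pvStepA, pvScanRank, if_neg hc]
  split <;> rfl

-- reference nested scan over the rank lists
def pvGoRanks : List (List Char) → Int → Int → List (Int × Int) → List (Int × Int)
  | [], _, _, pos => pos
  | rank :: rest, row, col, pos =>
      pvGoRanks rest (row - 1) 0 (rank.foldl (pvScanRank row) (col, pos)).2

-- A's flat scan computes the nested scan over the '/'-split
theorem pv_flat_eq_ranks (l : List Char) : ∀ (row col : Int) (pos : List (Int × Int)),
    (l.foldl pvStepA (col, row, pos)).2.2 = pvGoRanks (pvSC l) row col pos := by
  induction l with
  | nil => intro row col pos; simp [pvSC, pvGoRanks]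
  | cons c t ih =>
    intro row col pos
    by_cases hc : c = '/'
    · subst hc
      simp only [List.foldl_cons]
      rw [show pvStepA (col, row, pos) '/' = (0, row - 1, pos) from by simp [pvStepA],
        ih (row - 1) 0 pos]
      simp [pvSC, pvGoRanks]
    · obtain ⟨h, r, hsc⟩ : ∃ h r, pvSC t = h :: r := by
        cases hh : pvSC t with
        | nil => exact absurd hh (pvSC_ne_nil t)
        | cons a b => exact ⟨a, b, rfl⟩
      simp only [List.foldl_cons, pvStepA_ne col row pos c hc]
      rw [ih row _ _]
      simp only [pvSC, if_neg hc, hsc, pvConsH, List.singleton_append, pvGoRanks,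
        List.foldl_cons]

-- B's per-rank X extractor
def pvFX (row : Int) (cp : Int × Char) : Option (Int × Int) :=
  if cp.2 = 'X' then some (row, cp.1 + 1) else none

theorem pvIsdigit_ge (c : Char) (h : PySem.Chars.isdigit c = true) : 48 ≤ c.toNat := by
  unfold PySem.Chars.isdigit at h
  simp only [Bool.and_eq_true, decide_eq_true_eq] at h
  exact h.1

theorem pvFX_replicate (row : Int) (n : Nat) : ∀ (s : Int),
    (PySem.List.enumerate (List.replicate n '.') s).filterMap (pvFX row) = [] := by
  induction n with
  | zero => intro s; simp
  | succ m ih =>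
    intro s
    simp only [List.replicate_succ, PySem.List.enumerate_cons, List.filterMap_cons]
    have : pvFX row (s, '.') = none := by simp [pvFX]
    rw [this, ih]

-- the running-counter rank scan equals the positional read-off on the expanded rank
theorem pv_rank_eq (rk : List Char) : ∀ (row col : Int) (pos : List (Int × Int)),
    rk.foldl (pvScanRank row) (col, pos)
      = (col + (pvExpandL rk).length,
         pos ++ (PySem.List.enumerate (pvExpandL rk) col).filterMap (pvFX row)) := by
  induction rk with
  | nil => intro row col pos; simp [pvExpandL]
  | cons c t ih =>
    intro row col pos
    by_cases hd : PySem.Chars.isdigit c = true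
    · have hstep : pvScanRank row (col, pos) c = (col + ((c.toNat : Int) - 48), pos) := by
        simp [pvScanRank, hd]
      have hex : pvExpandL (c :: t) = List.replicate (c.toNat - 48) '.' ++ pvExpandL t := by
        simp [pvExpandL, List.flatMap_cons, pvExpand1, hd]
      simp only [List.foldl_cons, hstep, ih, hex, PySem.List.enumerate_append,
        List.filterMap_append, pvFX_replicate, List.nil_append, List.length_append,
        List.length_replicate]
      have h48 := pvIsdigit_ge c hd
      have hcast : ((c.toNat - 48 : Nat) : Int) = (c.toNat : Int) - 48 := by omega
      simp only [hcast, Prod.mk.injEq]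
      constructor
      · omega
      · trivial
    · have hex : pvExpandL (c :: t) = c :: pvExpandL t := by
        simp [pvExpandL, List.flatMap_cons, pvExpand1, hd]
      have hstep : pvScanRank row (col, pos) c
          = (col + 1, if c = 'X' then pos ++ [(row, col + 1)] else pos) := by
        simp [pvScanRank, hd]
      simp only [List.foldl_cons, hstep, ih, hex, PySem.List.enumerate_cons,
        List.filterMap_cons, List.length_cons]
      by_cases hx : c = 'X'
      · subst hx
        have hfx : pvFX row ((col : Int), 'X') = some (row, col + 1) := by simp [pvFX]
        simp only [hfx, Prod.mk.injEq]
        constructor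
        · push_cast; ring
        · simp
      · have hfx : pvFX row ((col : Int), c) = none := by simp [pvFX, hx]
        simp only [hfx, if_neg hx, Prod.mk.injEq]
        constructor
        · push_cast; ring
        · trivial

-- the nested scan equals B's flatMap over enumerated expanded ranks
theorem pv_ranks_eq (rs : List (List Char)) : ∀ (k : Int) (pos : List (Int × Int)),
    pvGoRanks rs (7 - k) 0 pos
      = pos ++ (PySem.List.enumerate (rs.map pvExpandL) k).flatMap (fun rp =>
          (PySem.List.enumerate rp.2).filterMap (pvFX (7 - rp.1))) := by
  induction rs with
  | nil => intro k pos; simp [pvGoRanks]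
  | cons rk rest ih =>
    intro k pos
    simp only [pvGoRanks, List.map_cons, PySem.List.enumerate_cons, List.flatMap_cons]
    rw [pv_rank_eq rk (7 - k) 0 pos]
    have h7 : 7 - k - 1 = 7 - (k + 1) := by ring
    rw [h7, ih (k + 1)]
    simp

-- ===== VERDICT =====
theorem get_not_visible_squares_py_spec : Claim_equal_get_not_visible_squares_py := by
  intro fen _
  unfold Spec_get_not_visible_squares_py get_not_visible_squares_py get_not_visible_squares_py_alt
  simp only []
  rw [pv_flat_eq_ranks]
  rw [show (((PySem.Str.split? fen " ").getD []).headD "").toList.flatMap pvExpand1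
      = pvExpandL (((PySem.Str.split? fen " ").getD []).headD "").toList from rfl]
  rw [pv_splitOn_slash, pvSC_expand]
  have := pv_ranks_eq (pvSC (((PySem.Str.split? fen " ").getD []).headD "").toList) 0 []
  simp only [sub_zero, List.nil_append] at this
  rw [this]
  rfl
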